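-- pv_equiv track=rewrite | github.com/ajkirkham/advent-of-code | day-1/partridge.py | calc_fuel_for_module
-- ===== SOURCE A (Python) =====
-- import math
--
-- def calc_fuel_for_module(mass):
--     def calc_fuel(mass):
--         return math.floor(mass / 3) - 2
--     total = 0
--     new_mass = calc_fuel(mass)
--     while new_mass > 0:
--         total += new_mass
--         new_mass = calc_fuel(new_mass)
--     return total
-- ===== SOURCE B (Python) =====
-- import math
--
-- def calc_fuel_for_module(mass):
--     fuel = math.floor(mass / 3) - 2
--     if fuel <= 0:
--         return 0
--     return fuel + calc_fuel_for_module(fuel)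
-- ===== Notes on version B (the rewrite author's own statement) =====
-- stated objective: simpler
-- what changed: Replaces A's while-loop with an explicit accumulator by a direct recursion over the fuel recurrence (fuel needs fuel), with no mutable state.
import Mathlib
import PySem

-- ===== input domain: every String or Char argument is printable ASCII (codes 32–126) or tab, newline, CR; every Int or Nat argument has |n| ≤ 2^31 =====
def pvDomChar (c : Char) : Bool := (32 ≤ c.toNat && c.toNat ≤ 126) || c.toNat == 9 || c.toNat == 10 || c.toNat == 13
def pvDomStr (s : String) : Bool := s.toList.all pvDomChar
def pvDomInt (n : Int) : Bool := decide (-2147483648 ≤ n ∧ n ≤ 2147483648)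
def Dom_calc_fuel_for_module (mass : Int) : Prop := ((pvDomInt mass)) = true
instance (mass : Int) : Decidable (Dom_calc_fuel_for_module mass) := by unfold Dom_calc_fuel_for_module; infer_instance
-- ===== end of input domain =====

-- B replaces A's while-loop with accumulator by a direct recursion over the fuel recurrence (simpler decomposition, same cost).
-- Note: math.floor(mass / 3) equals mass // 3 exactly for |mass| ≤ 2^31 (floats are exact here), ported as PySem.Int.floordiv.

-- termination measure facts, cited by the ports' decreasing_by
theorem pv_fuel_lt (n : Int) (h : 0 < n) :
    (PySem.Int.floordiv n 3 - 2).toNat < n.toNat := by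
  have h3 : (0:Int) < 3 := by omega
  rw [PySem.Int.floordiv_eq_ediv_of_pos h3]
  have := Int.ediv_le_self (b := 3) (le_of_lt h)
  omega

theorem pv_mass_pos (mass : Int) (h : ¬ PySem.Int.floordiv mass 3 - 2 ≤ 0) : 0 < mass := by
  have h3 : (3:Int) ≤ PySem.Int.floordiv mass 3 := by omega
  rw [PySem.Int.le_floordiv_iff_mul_le (by omega)] at h3
  omega

-- ===== PORT A =====
-- A's while-loop: state (total, new_mass); adds new_mass, then new_mass = floor(new_mass/3) - 2
def calc_fuel_loopA (total new_mass : Int) : Int :=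
  if h : 0 < new_mass then
    calc_fuel_loopA (total + new_mass) (PySem.Int.floordiv new_mass 3 - 2)
  else
    total
termination_by new_mass.toNat
decreasing_by exact pv_fuel_lt new_mass h

def calc_fuel_for_module (mass : Int) : Int :=
  calc_fuel_loopA 0 (PySem.Int.floordiv mass 3 - 2)

-- ===== PORT B =====
def calc_fuel_for_module_alt (mass : Int) : Int :=
  let fuel := PySem.Int.floordiv mass 3 - 2
  if h : fuel ≤ 0 then 0
  else fuel + calc_fuel_for_module_alt fuel
termination_by mass.toNat
decreasing_by exact pv_fuel_lt mass (pv_mass_pos mass h)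

-- ===== PRECONDITION & SPEC =====
def Spec_calc_fuel_for_module (mass : Int) (out : Int) : Prop := out = calc_fuel_for_module_alt mass
instance (mass : Int) (out : Int) : Decidable (Spec_calc_fuel_for_module mass out) := by unfold Spec_calc_fuel_for_module; infer_instance

-- ===== CLAIM (what is proved, stated in full; the proofs are below) =====
def Claim_equal_calc_fuel_for_module : Prop := ∀ (mass : Int), Dom_calc_fuel_for_module mass → Spec_calc_fuel_for_module mass (calc_fuel_for_module mass)

-- ===== LEMMAS AND PROOFS =====

-- one-step unfolding of B's recursion, phrased with a plain if
theorem alt_unfold (mass : Int) :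
    calc_fuel_for_module_alt mass =
      (if 0 < PySem.Int.floordiv mass 3 - 2 then
        PySem.Int.floordiv mass 3 - 2 +
          calc_fuel_for_module_alt (PySem.Int.floordiv mass 3 - 2)
      else 0) := by
  conv_lhs => rw [calc_fuel_for_module_alt]
  split_ifs with h1 h2 <;> first | rfl | omega

-- A's loop computes total plus (if n positive, n plus B's recursion on n)
theorem loopA_eq_aux (k : Nat) : ∀ (n : Int), n.toNat ≤ k → ∀ total : Int,
    calc_fuel_loopA total n =
      total + (if 0 < n then n + calc_fuel_for_module_alt n else 0) := by
  induction k with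
  | zero =>
    intro n hn total
    rw [calc_fuel_loopA, dif_neg (by omega), if_neg (by omega)]; ring
  | succ k ih =>
    intro n hn total
    rw [calc_fuel_loopA]
    by_cases h : 0 < n
    · rw [dif_pos h, ih _ (by have := pv_fuel_lt n h; omega), if_pos h,
        alt_unfold n]
      split_ifs <;> ring
    · rw [dif_neg h, if_neg h]; ring

theorem loopA_eq (n : Int) (total : Int) :
    calc_fuel_loopA total n =
      total + (if 0 < n then n + calc_fuel_for_module_alt n else 0) :=
  loopA_eq_aux n.toNat n le_rfl total

-- ===== VERDICT (by name: the statement is the Claim_ definition above) =====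
theorem calc_fuel_for_module_spec : Claim_equal_calc_fuel_for_module := by
  intro mass _
  unfold Spec_calc_fuel_for_module calc_fuel_for_module
  rw [loopA_eq, alt_unfold mass]
  split_ifs <;> ring
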